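-- pv_equiv track=rewrite | github.com/Intelligent-molecular-systems/Inverse_copolymer_design | scripts/optimize_GA_correct.py | indices_of_improvement
-- ===== SOURCE A (Python) =====
-- def indices_of_improvement(values):
--     indices_of_increases = []
--
--     # Initialize the highest value and its index
--     highest_value = values[0]
--     highest_index = 0
--
--     # Iterate through the values
--     for i, value in enumerate(values):
--         # If the current value is greater than the previous highest value
--         if value < highest_value:
--             highest_value = value  # Update the highest value
--             highest_index = i      # Update the index of the highest value
--             indices_of_increases.append(i)  # Save the index of increase
--
--     return indices_of_increases
-- ===== SOURCE B (Python) =====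
-- from itertools import accumulate
--
--
-- def indices_of_improvement(values):
--     mins = list(accumulate(values, min))
--     return [i for i, (prev, cur) in enumerate(zip(mins, mins[1:]), start=1)
--             if cur < prev]
-- ===== Notes on version B (the rewrite author's own statement) =====
-- stated objective: alternative
-- what changed: B materialises the prefix-min table with itertools.accumulate in one pass and then collects, in a second pass over adjacent pairs, each index i>=1 where the table strictly drops, instead of A's single fused loop carrying highest_value/highest_index state.
import Mathlib
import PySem

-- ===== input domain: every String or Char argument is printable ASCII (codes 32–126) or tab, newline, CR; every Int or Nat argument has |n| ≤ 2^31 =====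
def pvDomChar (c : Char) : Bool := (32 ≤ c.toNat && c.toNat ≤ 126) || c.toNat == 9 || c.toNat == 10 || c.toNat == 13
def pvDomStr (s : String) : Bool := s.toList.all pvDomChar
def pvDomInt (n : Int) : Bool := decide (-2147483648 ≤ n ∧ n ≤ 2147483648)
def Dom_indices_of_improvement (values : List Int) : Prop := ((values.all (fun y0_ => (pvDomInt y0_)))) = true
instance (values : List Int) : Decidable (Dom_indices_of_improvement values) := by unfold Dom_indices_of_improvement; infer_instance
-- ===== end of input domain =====

-- B replaces A's fused running-min loop by a two-pass form: build the prefix-min table, then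
-- collect indices where adjacent table entries strictly drop (alternative decomposition, same cost).


-- ===== PORT A =====
-- literal port of A: single loop over enumerate(values) carrying (highest_value, highest_index, acc)
def indices_of_improvement (values : List Int) : List Int :=
  match values with
  | [] => []   -- Python raises IndexError at values[0]; excluded by Pre_
  | v0 :: _ =>
    ((PySem.List.enumerate values 0).foldl
      (fun (st : Int × Int × List Int) (p : Int × Int) =>
        if p.2 < st.1 then (p.2, p.1, st.2.2 ++ [p.1]) else st)
      (v0, 0, [])).2.2

-- ===== PORT B =====
-- accumulate(values, min): the prefix-min table
def pvAccMins (m : Int) : List Int → List Int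
  | [] => []
  | x :: xs => min m x :: pvAccMins (min m x) xs

def indices_of_improvement_alt (values : List Int) : List Int :=
  let mins : List Int :=
    match values with
    | [] => []
    | v :: vs => v :: pvAccMins v vs
  (PySem.List.enumerate (mins.zip mins.tail) 1).filterMap
    (fun p => if p.2.2 < p.2.1 then some p.1 else none)

-- ===== PRECONDITION & SPEC =====
-- Pre_ excludes only the empty list, on which A raises IndexError.
def Pre_indices_of_improvement (values : List Int) : Prop := values ≠ []
instance (values : List Int) : Decidable (Pre_indices_of_improvement values) := by unfold Pre_indices_of_improvement; infer_instance
def pvWitness_indices_of_improvement : List Int := [3, 1, 2, 0]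

def Spec_indices_of_improvement (values : List Int) (out : List Int) : Prop := out = indices_of_improvement_alt values
instance (values : List Int) (out : List Int) : Decidable (Spec_indices_of_improvement values out) := by unfold Spec_indices_of_improvement; infer_instance

-- ===== CLAIM (what is proved, stated in full; the proofs are below) =====
def Claim_equal_indices_of_improvement : Prop := ∀ (values : List Int), Dom_indices_of_improvement values → Pre_indices_of_improvement values → Spec_indices_of_improvement values (indices_of_improvement values)

-- ===== LEMMAS AND PROOFS =====

-- common characterisation: indices k, k+1, … of xs where the element drops below the running min m
def pvSpecIdx (m k : Int) : List Int → List Int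
  | [] => []
  | x :: xs => if x < m then k :: pvSpecIdx x (k + 1) xs else pvSpecIdx m (k + 1) xs

lemma foldA (xs : List Int) : ∀ (m h : Int) (acc : List Int) (k : Int),
    ((PySem.List.enumerate xs k).foldl
      (fun (st : Int × Int × List Int) (p : Int × Int) =>
        if p.2 < st.1 then (p.2, p.1, st.2.2 ++ [p.1]) else st)
      (m, h, acc)).2.2 = acc ++ pvSpecIdx m k xs := by
  induction xs with
  | nil => intro m h acc k; simp [PySem.List.enumerate_nil, pvSpecIdx]
  | cons x xs ih =>
    intro m h acc k
    rw [PySem.List.enumerate_cons]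
    simp only [List.foldl_cons]
    by_cases hx : x < m
    · simp only [hx, if_pos, ih, pvSpecIdx, List.append_assoc, List.singleton_append]
    · simp only [hx, if_neg, ih, pvSpecIdx, not_false_iff]

lemma foldB (xs : List Int) : ∀ (m k : Int),
    (PySem.List.enumerate ((m :: pvAccMins m xs).zip (pvAccMins m xs)) k).filterMap
      (fun p => if p.2.2 < p.2.1 then some p.1 else none) = pvSpecIdx m k xs := by
  induction xs with
  | nil => intro m k; simp [pvAccMins, PySem.List.enumerate_nil, pvSpecIdx]
  | cons x xs ih =>
    intro m k
    simp only [pvAccMins, List.zip_cons_cons, PySem.List.enumerate_cons, List.filterMap_cons]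
    by_cases hx : x < m
    · have hmin : min m x = x := min_eq_right hx.le
      simp only [hmin, pvSpecIdx, hx, if_pos]
      rw [ih x (k + 1)]
    · have hmin : min m x = m := min_eq_left (le_of_not_gt hx)
      simp only [hmin, pvSpecIdx, hx, if_neg, lt_irrefl, not_false_iff]
      rw [ih m (k + 1)]

-- ===== VERDICT (by name: the statement is the Claim_ definition above) =====
theorem indices_of_improvement_spec : Claim_equal_indices_of_improvement := by
  intro values _ hpre
  unfold Spec_indices_of_improvement
  cases values with
  | nil => exact absurd rfl hpre
  | cons v vs =>
    show ((PySem.List.enumerate (v :: vs) 0).foldl _ (v, 0, [])).2.2 = _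
    rw [foldA]
    unfold indices_of_improvement_alt
    simp only [List.tail_cons]
    rw [foldB vs v 1]
    simp [pvSpecIdx]
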